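-- pv_equiv track=rewrite | github.com/marishkasept/Python-basic-Doom-Patrol | my_homeworks/lab 3.py | regulation
-- ===== SOURCE A (Python) =====
-- def remove_zeros(a):
--     while a[0] == 0 and len(a) > 1:
--         a.pop(0)
--     return a
--
-- def regulation(a, b):
--     a = remove_zeros(a)
--     b = remove_zeros(b)
--     if len(a) == len(b):
--         i = 0
--         while i < len(a)-1 and a[i] == b[i]:
--             i += 1
--         if a[i] < b[i]:
--             return 0
--         else:
--             return 1
--     elif len(a) < len(b):
--         return 0
--     return 1
-- ===== SOURCE B (Python) =====
-- def regulation(a, b):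
--     # Effective length = number of elements from the first nonzero on (min 1 for
--     # a nonempty list); computed by one forward fold, no stripping or mutation.
--     def eff(xs):
--         n = 0
--         for x in xs:
--             if n > 0 or x != 0:
--                 n += 1
--         return n if n > 0 else (1 if xs else 0)
--
--     na, nb = eff(a), eff(b)
--     if na != nb:
--         return 1 if na > nb else 0
--     # Equal effective lengths: scan right-to-left; the leftmost difference is
--     # seen last and overwrites the verdict.  Surplus pairs beyond the effective
--     # length are (0, 0) on both sides, which never change the verdict.
--     v = 1
--     for x, y in zip(reversed(a), reversed(b)):
--         if x != y:
--             v = 0 if x < y else 1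
--     return v
-- ===== Notes on version B (the rewrite author's own statement) =====
-- stated objective: alternative
-- what changed: B never strips, slices or mutates the lists: one forward fold computes each list's effective length (elements from the first nonzero), and the verdict comes from a right-to-left scan of zip(reversed(a), reversed(b)) where leftward differences overwrite and the longer list's surplus (0,0) pairs are no-ops.
-- crash fix: On inputs where a or b is the empty list A raises IndexError (a[0] in remove_zeros); B returns a value there (e.g. 1 on ([], [])). — e.g. on regulation([], []): A raises IndexError, B returns 1
import Mathlib
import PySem

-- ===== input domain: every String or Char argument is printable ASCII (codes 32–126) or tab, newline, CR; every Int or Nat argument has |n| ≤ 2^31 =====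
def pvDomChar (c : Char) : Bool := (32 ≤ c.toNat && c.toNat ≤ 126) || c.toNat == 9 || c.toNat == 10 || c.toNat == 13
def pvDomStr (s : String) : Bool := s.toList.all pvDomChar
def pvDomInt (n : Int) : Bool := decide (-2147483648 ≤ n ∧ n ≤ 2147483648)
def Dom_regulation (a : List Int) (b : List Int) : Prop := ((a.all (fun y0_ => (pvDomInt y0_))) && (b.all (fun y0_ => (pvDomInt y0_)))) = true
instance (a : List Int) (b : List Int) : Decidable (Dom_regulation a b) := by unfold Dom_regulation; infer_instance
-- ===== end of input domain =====

-- B never strips, slices or mutates (A pops a's and b's leading zeros in place, so the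
-- equivalence is about the RETURN value only): B computes effective lengths by one forward
-- fold and the verdict by a right-to-left overwrite scan of the zipped reversed lists.

-- ===== PORT A =====
-- while a[0] == 0 and len(a) > 1: a.pop(0)   (a = [] raises IndexError; excluded by Pre_)
def removeZeros : List Int → List Int
  | x :: y :: rest => if x = 0 then removeZeros (y :: rest) else x :: y :: rest
  | l => l

-- the index loop of A: i advances while i < len-1 and a[i] == b[i], then a[i] < b[i] ? 0 : 1
-- (called only on nonempty equal-length lists; the [],[] case is unreachable under Pre_)
def cmpSame : List Int → List Int → Int
  | [x], [y] => if x < y then 0 else 1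
  | x :: xs, y :: ys => if x = y then cmpSame xs ys else if x < y then 0 else 1
  | _, _ => 1

def regulation (a : List Int) (b : List Int) : Int :=
  let a := removeZeros a
  let b := removeZeros b
  if a.length = b.length then cmpSame a b
  else if a.length < b.length then 0
  else 1

-- ===== PORT B =====
-- the body of eff's for-loop: n += 1 when n > 0 or x != 0
def effStep (n : Nat) (x : Int) : Nat := if 0 < n ∨ x ≠ 0 then n + 1 else n

-- def eff(xs): one forward fold, then `n if n > 0 else (1 if xs else 0)`
def effLen (xs : List Int) : Nat :=
  let n := xs.foldl effStep 0
  if 0 < n then n else (if xs ≠ [] then 1 else 0)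

-- the body of the verdict loop: differences overwrite v
def vStep (v : Int) (p : Int × Int) : Int :=
  if p.1 ≠ p.2 then (if p.1 < p.2 then 0 else 1) else v

def regulation_alt (a : List Int) (b : List Int) : Int :=
  let na := effLen a
  let nb := effLen b
  if na ≠ nb then (if nb < na then 1 else 0)
  else (a.reverse.zip b.reverse).foldl vStep 1

-- ===== PRECONDITION & SPEC =====
-- A raises IndexError (a[0] on an empty list in remove_zeros) iff a or b is empty.
def Pre_regulation (a : List Int) (b : List Int) : Prop := a ≠ [] ∧ b ≠ []
instance (a : List Int) (b : List Int) : Decidable (Pre_regulation a b) := by unfold Pre_regulation; infer_instance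
def pvWitness_regulation : List Int × List Int := ([0, 3], [1, 2])

-- On inputs where a or b is the empty list A raises IndexError; B returns a value there.
def Raises_regulation (a : List Int) (b : List Int) : Prop := a = [] ∨ b = []
instance (a : List Int) (b : List Int) : Decidable (Raises_regulation a b) := by unfold Raises_regulation; infer_instance
def pvRaiseWitness_regulation : List Int × List Int := ([], [])
def pvRaiseWitnessOut_regulation : Int := 1

def Spec_regulation (a : List Int) (b : List Int) (out : Int) : Prop := out = regulation_alt a b
instance (a : List Int) (b : List Int) (out : Int) : Decidable (Spec_regulation a b out) := by unfold Spec_regulation; infer_instance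

-- ===== CLAIM =====
def Claim_equal_regulation : Prop := ∀ (a : List Int) (b : List Int), Dom_regulation a b → Pre_regulation a b → Spec_regulation a b (regulation a b)
def Claim_raises_regulation : Prop := (∀ (a : List Int) (b : List Int), Dom_regulation a b → Raises_regulation a b → ¬ Pre_regulation a b) ∧ (Dom_regulation (pvRaiseWitness_regulation.1) (pvRaiseWitness_regulation.2) ∧ Raises_regulation (pvRaiseWitness_regulation.1) (pvRaiseWitness_regulation.2) ∧ regulation_alt (pvRaiseWitness_regulation.1) (pvRaiseWitness_regulation.2) = pvRaiseWitnessOut_regulation)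

-- ===== LEMMAS AND PROOFS =====

-- every nonempty list is a block of leading zeros followed by its removeZeros result
theorem removeZeros_decomp (a : List Int) : ∃ k, a = List.replicate k 0 ++ removeZeros a := by
  induction a with
  | nil => exact ⟨0, rfl⟩
  | cons x xs ih =>
    cases xs with
    | nil => exact ⟨0, by simp [removeZeros]⟩
    | cons y rest =>
      by_cases hx : x = 0
      · subst hx
        obtain ⟨k, hk⟩ := ih
        refine ⟨k + 1, ?_⟩
        simp only [removeZeros]
        calc (0 : Int) :: y :: rest = 0 :: (List.replicate k 0 ++ removeZeros (y :: rest)) := by rw [← hk]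
          _ = List.replicate (k+1) 0 ++ removeZeros (y :: rest) := by simp [List.replicate_succ]
      · exact ⟨0, by simp [removeZeros, hx]⟩

theorem foldl_effStep_pos (xs : List Int) (n : Nat) (h : 0 < n) :
    xs.foldl effStep n = n + xs.length := by
  induction xs generalizing n with
  | nil => simp
  | cons x xs ih =>
    simp only [List.foldl_cons, effStep, if_pos (Or.inl h)]
    rw [ih (n + 1) (by omega)]
    simp; omega

theorem effLen_eq (a : List Int) (h : a ≠ []) : effLen a = (removeZeros a).length := by
  induction a with
  | nil => exact absurd rfl h
  | cons x xs ih =>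
    cases xs with
    | nil =>
      by_cases hx : x = 0 <;> simp [effLen, removeZeros, effStep, hx]
    | cons y rest =>
      by_cases hx : x = 0
      · subst hx
        have h0 : effStep 0 (0 : Int) = 0 := by simp [effStep]
        have : effLen (0 :: y :: rest) = effLen (y :: rest) := by
          simp [effLen, List.foldl_cons, h0]
        rw [this, ih (by simp)]
        simp [removeZeros]
      · have h1 : effStep 0 x = 1 := by simp [effStep, hx]
        unfold effLen
        rw [List.foldl_cons, h1, foldl_effStep_pos _ 1 (by omega)]
        simp [removeZeros, hx]; omega

theorem foldl_vStep_zeros (n : Nat) (v : Int) :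
    (List.replicate n ((0 : Int), (0 : Int))).foldl vStep v = v := by
  induction n generalizing v with
  | zero => rfl
  | succ m ih => simp only [List.replicate_succ, List.foldl_cons, vStep]; simpa using ih v

theorem zip_replicate_zeros (n m : Nat) :
    (List.replicate n (0 : Int)).zip (List.replicate m (0 : Int)) =
      List.replicate (min n m) ((0 : Int), (0 : Int)) := by
  induction n generalizing m with
  | zero => simp
  | succ k ih =>
    cases m with
    | zero => simp
    | succ l => simp [List.replicate_succ, List.zip_cons_cons, ih l, Nat.succ_min_succ]

theorem zip_reverse_eq (xs ys : List Int) (h : xs.length = ys.length) :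
    xs.reverse.zip ys.reverse = (xs.zip ys).reverse := by
  induction xs generalizing ys with
  | nil => cases ys with | nil => rfl | cons y ys => simp at h
  | cons x xs ih =>
    cases ys with
    | nil => simp at h
    | cons y ys =>
      have hl : xs.length = ys.length := by simpa using h
      simp only [List.reverse_cons, List.zip_cons_cons]
      rw [List.zip_append (by simp [hl]), ih ys hl]
      simp

theorem foldr_vStep_eq_cmpSame (xs ys : List Int) (h : xs.length = ys.length) :
    (xs.zip ys).foldr (fun p v => vStep v p) 1 = cmpSame xs ys := by
  induction xs generalizing ys with
  | nil => cases ys with | nil => rfl | cons y ys => simp at h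
  | cons x xs ih =>
    cases ys with
    | nil => simp at h
    | cons y ys =>
      have hl : xs.length = ys.length := by simpa using h
      cases xs with
      | nil =>
        cases ys with
        | nil =>
          by_cases hxy : x = y
          · subst hxy; simp [cmpSame, vStep]
          · simp [cmpSame, vStep, hxy]
        | cons z zs => simp at hl
      | cons w ws =>
        cases ys with
        | nil => simp at hl
        | cons z zs =>
          by_cases hxy : x = y
          · subst hxy
            rw [List.zip_cons_cons, List.foldr_cons]
            have hv : ∀ r : Int, vStep r (x, x) = r := by intro r; simp [vStep]
            rw [hv, ih (z :: zs) hl]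
            simp [cmpSame]
          · rw [List.zip_cons_cons, List.foldr_cons]
            simp [vStep, cmpSame, hxy]

-- the whole right-to-left scan equals A's first-difference comparison of the stripped lists
theorem scan_eq_cmpSame (a b : List Int)
    (h : (removeZeros a).length = (removeZeros b).length) :
    (a.reverse.zip b.reverse).foldl vStep 1 = cmpSame (removeZeros a) (removeZeros b) := by
  obtain ⟨ka, hka⟩ := removeZeros_decomp a
  obtain ⟨kb, hkb⟩ := removeZeros_decomp b
  set sa := removeZeros a
  set sb := removeZeros b
  rw [hka, hkb]
  simp only [List.reverse_append, List.reverse_replicate]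
  rw [List.zip_append (by simp [h]), List.foldl_append, zip_replicate_zeros,
    foldl_vStep_zeros, zip_reverse_eq sa sb h, List.foldl_reverse]
  exact foldr_vStep_eq_cmpSame sa sb h

-- ===== VERDICT =====
theorem regulation_spec : Claim_equal_regulation := by
  intro a b _ hpre
  unfold Spec_regulation regulation regulation_alt
  rw [effLen_eq a hpre.1, effLen_eq b hpre.2]
  by_cases hlen : (removeZeros a).length = (removeZeros b).length
  · rw [if_pos hlen, if_neg (by omega), scan_eq_cmpSame a b hlen]
  · rw [if_neg hlen, if_pos hlen]
    by_cases hless : (removeZeros a).length < (removeZeros b).length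
    · rw [if_pos hless, if_neg (by omega)]
    · rw [if_neg hless, if_pos (by omega)]

def regulation_raises : Claim_raises_regulation := by
  unfold Claim_raises_regulation
  constructor
  · intro a b _ hr hpre
    rcases hr with h | h
    · exact hpre.1 h
    · exact hpre.2 h
  · exact ⟨by decide, by decide, by decide⟩
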